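-- pv_equiv track=rewrite | github.com/MasterIceZ/2110581 | rosalind/HierarchicalClustering.py | get_descendant_list
-- ===== SOURCE A (Python) =====
-- def get_descendant_list(t, stp):
--   q = [stp]
--   res = list()
--   while len(q):
--     cur = q.pop(0)
--     if cur in t:
--       q.append(t[cur])
--     else:
--       res.append(cur)
--   return res
-- ===== SOURCE B (Python) =====
-- def get_descendant_list(t, stp):
--   # Pointer doubling: square the whole jump map until one jump spans any
--   # terminating chain, then answer with a single lookup.
--   f = dict(t)
--   span = 1
--   while span <= len(t):
--     f = {k: f.get(v, v) for k, v in f.items()}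
--     span *= 2
--   return [f.get(stp, stp)]
-- ===== Notes on version B (the rewrite author's own statement) =====
-- stated objective: alternative
-- what changed: Replaces A's step-by-step queue walk along the successor chain with pointer doubling: B repeatedly squares the whole jump map (f = {k: f.get(v, v) for k, v in f.items()}) until a single jump spans any terminating chain, then answers with one lookup; Pre_ excludes inputs whose chain from stp never leaves the key set, on which Python A loops forever.
import Mathlib
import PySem

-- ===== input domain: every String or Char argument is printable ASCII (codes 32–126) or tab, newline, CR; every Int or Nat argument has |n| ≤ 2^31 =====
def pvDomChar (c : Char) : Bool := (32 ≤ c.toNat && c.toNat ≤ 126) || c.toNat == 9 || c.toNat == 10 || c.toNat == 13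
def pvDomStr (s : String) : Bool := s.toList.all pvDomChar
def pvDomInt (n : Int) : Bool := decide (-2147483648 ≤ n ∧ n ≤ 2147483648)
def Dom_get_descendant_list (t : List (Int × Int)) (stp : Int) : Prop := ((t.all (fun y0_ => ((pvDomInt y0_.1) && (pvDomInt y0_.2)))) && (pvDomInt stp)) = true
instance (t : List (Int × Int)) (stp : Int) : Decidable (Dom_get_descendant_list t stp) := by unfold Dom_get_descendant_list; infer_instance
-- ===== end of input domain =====

-- B replaces A's step-by-step queue walk with pointer doubling over the whole jump map
-- (the objective is an alternative algorithm, not speed); equivalence is about the return value.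

-- first-match association-list lookup (Python dict lookup under the type convention)
def pvLookup (t : List (Int × Int)) (x : Int) : Option Int :=
  (t.find? (fun p => p.1 == x)).map (·.2)

-- the successor map as a total function: t[x] if x is a key, else x (used by Pre_ and the proofs)
def pvStep (t : List (Int × Int)) (x : Int) : Int := (pvLookup t x).getD x

-- ===== PORT A =====
-- A's while-loop over queue q and accumulator res, with fuel t.length + 1; under
-- Pre_ below the chain leaves the key set within t.length lookups, so the fuel
-- is never exhausted on admitted inputs.
def pvGoA (t : List (Int × Int)) : Nat → List Int → List Int → List Int
  | 0, q, res => res ++ q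
  | fuel + 1, q, res =>
    match q with
    | [] => res
    | cur :: rest =>
      match pvLookup t cur with
      | some v => pvGoA t fuel (rest ++ [v]) res
      | none => pvGoA t fuel rest (res ++ [cur])

def get_descendant_list (t : List (Int × Int)) (stp : Int) : List Int :=
  pvGoA t (t.length + 1) [stp] []

-- ===== PORT B =====
-- one squaring of the jump map: {k: f.get(v, v) for k, v in f.items()}
def pvSquare (f : List (Int × Int)) : List (Int × Int) :=
  f.map (fun kv => (kv.1, (pvLookup f kv.2).getD kv.2))

-- Source B's 'while span <= len(t): f = square f; span *= 2', with fuel t.length + 1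
-- (the span at least doubles each round, so the loop makes at most t.length rounds).
def pvLoopB (n : Nat) : Nat → Nat → List (Int × Int) → List (Int × Int)
  | 0, _, f => f
  | fuel + 1, span, f =>
    if span ≤ n then pvLoopB n fuel (span * 2) (pvSquare f) else f

def get_descendant_list_alt (t : List (Int × Int)) (stp : Int) : List Int :=
  let f := pvLoopB t.length (t.length + 1) 1 t
  [(pvLookup f stp).getD stp]

-- ===== PRECONDITION & SPEC =====
-- Pre_ excludes exactly the inputs whose successor chain from stp never leaves the
-- key set (a reachable cycle): there Python A's while-loop runs forever and returns
-- nothing. A terminating chain visits distinct keys, hence leaves the key set within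
-- t.length steps, so Pre_ admits every input on which A returns.
def Pre_get_descendant_list (t : List (Int × Int)) (stp : Int) : Prop :=
  pvLookup t ((pvStep t)^[t.length] stp) = none
instance (t : List (Int × Int)) (stp : Int) : Decidable (Pre_get_descendant_list t stp) := by
  unfold Pre_get_descendant_list; infer_instance

def pvWitness_get_descendant_list : (List (Int × Int)) × Int := ([(1, 2), (2, 5)], 1)

def Spec_get_descendant_list (t : List (Int × Int)) (stp : Int) (out : List Int) : Prop := out = get_descendant_list_alt t stp
instance (t : List (Int × Int)) (stp : Int) (out : List Int) : Decidable (Spec_get_descendant_list t stp out) := by unfold Spec_get_descendant_list; infer_instance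

-- ===== CLAIM (what is proved, stated in full; the proofs are below) =====
def Claim_equal_get_descendant_list : Prop := ∀ (t : List (Int × Int)) (stp : Int), Dom_get_descendant_list t stp → Pre_get_descendant_list t stp → Spec_get_descendant_list t stp (get_descendant_list t stp)

-- ===== LEMMAS AND PROOFS =====

-- a non-key is a fixed point of the successor map, hence of all its iterates
theorem pvStep_fix {t : List (Int × Int)} {y : Int} (h : pvLookup t y = none) :
    pvStep t y = y := by simp [pvStep, h]

theorem pvStep_iterate_fix {t : List (Int × Int)} {y : Int} (h : pvLookup t y = none)
    (k : Nat) : (pvStep t)^[k] y = y := by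
  induction k with
  | zero => rfl
  | succ k ih => rw [Function.iterate_succ_apply, pvStep_fix h, ih]

-- A side: with enough fuel the queue walk returns the chain's terminal node
theorem pvGoA_terminal (t : List (Int × Int)) :
    ∀ (fuel : Nat) (x : Int), pvLookup t ((pvStep t)^[fuel] x) = none →
      pvGoA t (fuel + 1) [x] [] = [(pvStep t)^[fuel] x] := by
  intro fuel
  induction fuel with
  | zero =>
    intro x h
    simp only [Function.iterate_zero, id] at h ⊢
    simp [pvGoA, h]
  | succ n ih =>
    intro x h
    show pvGoA t (n + 2) [x] [] = _
    simp only [pvGoA]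
    cases hx : pvLookup t x with
    | none =>
      rw [pvStep_iterate_fix hx] at h ⊢
      simp
    | some v =>
      have hv : pvStep t x = v := by simp [pvStep, hx]
      rw [Function.iterate_succ_apply, hv] at h ⊢
      simpa using ih v h

-- one squaring composes the jump map with itself (as a total function)
theorem pvSquare_apply (f : List (Int × Int)) (x : Int) :
    (pvLookup (pvSquare f) x).getD x =
      (pvLookup f ((pvLookup f x).getD x)).getD ((pvLookup f x).getD x) := by
  have hfind : (pvSquare f).find? (fun p => p.1 == x)
      = (f.find? (fun p => p.1 == x)).map (fun kv => (kv.1, (pvLookup f kv.2).getD kv.2)) := by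
    unfold pvSquare
    rw [List.find?_map]
    rfl
  cases hf : f.find? (fun p => p.1 == x) with
  | none => simp [pvLookup, hfind, hf]
  | some kv => simp [pvLookup, hfind, hf]

-- B side loop invariant: if the current map is the p-th iterate of the successor map,
-- the loop returns some q-th iterate with q > n (spans: 1 ≤ span ≤ p, n < fuel + span)
theorem pvLoopB_iterate (t : List (Int × Int)) (n : Nat) :
    ∀ (fuel span p : Nat) (f : List (Int × Int)), 1 ≤ span → span ≤ p → n < fuel + span →
      (∀ x, (pvLookup f x).getD x = (pvStep t)^[p] x) →
      ∃ q, n < q ∧ ∀ x, (pvLookup (pvLoopB n fuel span f) x).getD x = (pvStep t)^[q] x := by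
  intro fuel
  induction fuel with
  | zero =>
    intro span p f h1 hsp hfs hf
    exact ⟨p, by omega, by simpa [pvLoopB] using hf⟩
  | succ m ih =>
    intro span p f h1 hsp hfs hf
    simp only [pvLoopB]
    by_cases hle : span ≤ n
    · simp only [hle, if_true]
      refine ih (span * 2) (p * 2) (pvSquare f) (by omega) (by omega) (by omega) ?_
      intro x
      rw [pvSquare_apply, hf, hf, ← Function.iterate_add_apply, Nat.mul_two]
    · simp only [hle, if_false]
      exact ⟨p, by omega, hf⟩

-- iterates beyond the terminal step all return the terminal node
theorem pvStep_iterate_stable {t : List (Int × Int)} {x : Int} {n q : Nat}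
    (h : pvLookup t ((pvStep t)^[n] x) = none) (hq : n ≤ q) :
    (pvStep t)^[q] x = (pvStep t)^[n] x := by
  obtain ⟨k, rfl⟩ := Nat.exists_eq_add_of_le hq
  rw [Nat.add_comm, Function.iterate_add_apply, pvStep_iterate_fix h]

-- ===== VERDICT (by name: the statement is the Claim_ definition above) =====
theorem get_descendant_list_spec : Claim_equal_get_descendant_list := by
  intro t stp _ hpre
  unfold Spec_get_descendant_list get_descendant_list get_descendant_list_alt
  obtain ⟨q, hq, hloop⟩ := pvLoopB_iterate t t.length (t.length + 1) 1 1 t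
    (by omega) (by omega) (by omega) (fun x => rfl)
  show pvGoA t (t.length + 1) [stp] []
      = [(pvLookup (pvLoopB t.length (t.length + 1) 1 t) stp).getD stp]
  rw [pvGoA_terminal t t.length stp hpre, hloop,
    pvStep_iterate_stable (q := q) hpre hq.le]
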